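-- pv_equiv track=rewrite | github.com/sunava/cognitive_robot_abstract_machine | pycram/demos/thesis/extract_action_cases.py | infer_domain_hint
-- ===== SOURCE A (Python) =====
-- from typing import Iterable, List, Optional, Sequence
--
-- def infer_domain_hint(categories: Sequence[str]) -> Optional[str]:
--     for category in categories:
--         lowered = category.lower()
--         if "food" in lowered or "baking" in lowered or "vegetable" in lowered:
--             return "food_preparation"
--         if "clean" in lowered or "housekeeping" in lowered:
--             return "cleaning"
--         if "hair" in lowered or "personal care" in lowered:
--             return "grooming"
--         if "construction" in lowered or "home improvement" in lowered:
--             return "construction"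
--     return None
-- ===== SOURCE B (Python) =====
-- from typing import Optional, Sequence
--
-- # Flat keyword -> rule-index map; label chosen by the MINIMUM matching rule index,
-- # not by an ordered first-match scan of rule groups.
-- KEYWORDS = [
--     ("food", 0), ("baking", 0), ("vegetable", 0),
--     ("clean", 1), ("housekeeping", 1),
--     ("hair", 2), ("personal care", 2),
--     ("construction", 3), ("home improvement", 3),
-- ]
-- LABELS = ["food_preparation", "cleaning", "grooming", "construction"]
--
-- def _classify(lowered: str) -> Optional[str]:
--     hits = [i for kw, i in KEYWORDS if kw in lowered]
--     return LABELS[min(hits)] if hits else None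
--
-- def infer_domain_hint(categories: Sequence[str]) -> Optional[str]:
--     return next((lab for lab in (_classify(c.lower()) for c in categories) if lab is not None), None)
-- ===== Notes on version B (the rewrite author's own statement) =====
-- stated objective: alternative
-- what changed: Instead of an ordered if-chain of keyword groups with early return, B classifies each category by collecting ALL matching keywords from a flat keyword-to-priority map and taking the minimum priority index, then returns the first non-None classification via next() over a generator pipeline.
import Mathlib
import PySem

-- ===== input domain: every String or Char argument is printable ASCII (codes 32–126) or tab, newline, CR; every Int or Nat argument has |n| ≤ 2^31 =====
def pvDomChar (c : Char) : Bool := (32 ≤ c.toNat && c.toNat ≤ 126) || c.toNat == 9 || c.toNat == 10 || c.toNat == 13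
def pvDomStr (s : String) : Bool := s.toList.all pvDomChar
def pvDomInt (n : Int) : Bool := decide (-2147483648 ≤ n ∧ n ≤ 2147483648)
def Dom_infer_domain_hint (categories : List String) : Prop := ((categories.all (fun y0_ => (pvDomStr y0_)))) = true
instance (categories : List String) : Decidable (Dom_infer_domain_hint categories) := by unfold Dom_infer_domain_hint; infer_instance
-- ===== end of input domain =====

-- B replaces A's ordered if-chain with a flat keyword→priority map: per category it collects
-- ALL matching keyword priorities and takes the minimum, then returns the first non-None
-- classification; objective: alternative (same cost).

-- ===== PORT A =====
def infer_domain_hint : List String → Option String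
  | [] => none
  | category :: rest =>
    let lowered := PySem.Str.lower category
    if PySem.Str.isIn "food" lowered || PySem.Str.isIn "baking" lowered || PySem.Str.isIn "vegetable" lowered then
      some "food_preparation"
    else if PySem.Str.isIn "clean" lowered || PySem.Str.isIn "housekeeping" lowered then
      some "cleaning"
    else if PySem.Str.isIn "hair" lowered || PySem.Str.isIn "personal care" lowered then
      some "grooming"
    else if PySem.Str.isIn "construction" lowered || PySem.Str.isIn "home improvement" lowered then
      some "construction"
    else
      infer_domain_hint rest

-- ===== PORT B =====
def pvKeywords : List (String × Int) :=
  [("food", 0), ("baking", 0), ("vegetable", 0),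
   ("clean", 1), ("housekeeping", 1),
   ("hair", 2), ("personal care", 2),
   ("construction", 3), ("home improvement", 3)]

def pvLabels : List String := ["food_preparation", "cleaning", "grooming", "construction"]

-- hits = [i for kw, i in KEYWORDS if kw in lowered]; LABELS[min(hits)] if hits else None
def pvClassify (lowered : String) : Option String :=
  let hits := pvKeywords.filterMap (fun p => if PySem.Str.isIn p.1 lowered then some p.2 else none)
  (PySem.List.min? hits (fun x => x)).bind (fun m => PySem.List.pyGet? pvLabels m)

-- next((lab for lab in (classify(c.lower()) for c in categories) if lab is not None), None)
def infer_domain_hint_alt (categories : List String) : Option String :=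
  categories.findSome? (fun c => pvClassify (PySem.Str.lower c))

-- ===== PRECONDITION & SPEC =====
def Spec_infer_domain_hint (categories : List String) (out : Option String) : Prop := out = infer_domain_hint_alt categories
instance (categories : List String) (out : Option String) : Decidable (Spec_infer_domain_hint categories out) := by unfold Spec_infer_domain_hint; infer_instance

-- ===== CLAIM (what is proved, stated in full; the proofs are below) =====
def Claim_equal_infer_domain_hint : Prop := ∀ (categories : List String), Dom_infer_domain_hint categories → Spec_infer_domain_hint categories (infer_domain_hint categories)

-- ===== LEMMAS AND PROOFS =====
-- Per element: A's if-chain equals B's min-priority classification.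
theorem pvClassify_eq_chain (c : String) :
    (let lowered := PySem.Str.lower c
     if PySem.Str.isIn "food" lowered || PySem.Str.isIn "baking" lowered || PySem.Str.isIn "vegetable" lowered then
       some "food_preparation"
     else if PySem.Str.isIn "clean" lowered || PySem.Str.isIn "housekeeping" lowered then
       some "cleaning"
     else if PySem.Str.isIn "hair" lowered || PySem.Str.isIn "personal care" lowered then
       some "grooming"
     else if PySem.Str.isIn "construction" lowered || PySem.Str.isIn "home improvement" lowered then
       some "construction"
     else (none : Option String)) = pvClassify (PySem.Str.lower c) := by
  simp only [pvClassify, pvKeywords, pvLabels]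
  cases h1 : PySem.Str.isIn "food" (PySem.Str.lower c) <;>
  cases h2 : PySem.Str.isIn "baking" (PySem.Str.lower c) <;>
  cases h3 : PySem.Str.isIn "vegetable" (PySem.Str.lower c) <;>
  cases h4 : PySem.Str.isIn "clean" (PySem.Str.lower c) <;>
  cases h5 : PySem.Str.isIn "housekeeping" (PySem.Str.lower c) <;>
  cases h6 : PySem.Str.isIn "hair" (PySem.Str.lower c) <;>
  cases h7 : PySem.Str.isIn "personal care" (PySem.Str.lower c) <;>
  cases h8 : PySem.Str.isIn "construction" (PySem.Str.lower c) <;>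
  cases h9 : PySem.Str.isIn "home improvement" (PySem.Str.lower c) <;>
    simp only [h1, h2, h3, h4, h5, h6, h7, h8, h9, List.filterMap, if_true,
      Bool.or_false, Bool.or_true] <;> rfl

theorem infer_domain_hint_eq_alt (categories : List String) :
    infer_domain_hint categories = infer_domain_hint_alt categories := by
  induction categories with
  | nil => rfl
  | cons c rest ih =>
    rw [infer_domain_hint_alt, List.findSome?]
    rw [← pvClassify_eq_chain c]
    simp only [infer_domain_hint]
    split_ifs <;> simp_all [infer_domain_hint_alt]

-- ===== VERDICT (by name: the statement is the Claim_ definition above) =====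
theorem infer_domain_hint_spec : Claim_equal_infer_domain_hint := by
  intro categories _
  unfold Spec_infer_domain_hint
  exact infer_domain_hint_eq_alt categories
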